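-- pv_equiv track=rewrite | github.com/mflova/lazy-type-hint | dynamic_pyi_generator/file_modifiers/yaml_file_modifier.py | _detect_indentation
-- ===== SOURCE A (Python) =====
-- from typing import (
--     Final,
--     FrozenSet,
--     List,
--     Literal,
--     Mapping,
--     Optional,
--     Sequence,
--     Tuple,
--     Union,
-- )
--
-- def _detect_indentation(lines: Sequence[str]) -> Literal["spaces", "tabs", "??"]:
--     """
--     Detects the type of indentation used in the given lines.
--
--     Args:
--         lines (Sequence[str]): The lines of code to analyze.
--
--     Returns:
--         Literal["spaces", "tabs", "??"]: The type of indentation used. It can be "spaces" if spaces are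
--             used for indentation, "tabs" if tabs are used for indentation, or "??" if both spaces and
--             tabs are used.
--
--     """
--     tabs_used = any("\t" in line for line in lines)
--     spaces_used = any(" " in line for line in lines)
--     if tabs_used and spaces_used:
--         return "??"
--     elif tabs_used:
--         return "tabs"
--     elif spaces_used:
--         return "spaces"
--     else:
--         return "??"
-- ===== SOURCE B (Python) =====
-- def _detect_indentation(lines):
--     tabs_used = False
--     spaces_used = False
--     for line in lines:
--         if "\t" in line:
--             tabs_used = True
--         if " " in line:
--             spaces_used = True
--         if tabs_used and spaces_used:
--             return "??"
--     if tabs_used: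
--         return "tabs"
--     if spaces_used:
--         return "spaces"
--     return "??"
-- ===== Notes on version B (the rewrite author's own statement) =====
-- stated objective: alternative
-- what changed: Replaces the two independent any(...) scans over all lines by a single loop carrying two booleans that returns '??' early as soon as both a tab and a space have been seen.
import Mathlib
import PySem

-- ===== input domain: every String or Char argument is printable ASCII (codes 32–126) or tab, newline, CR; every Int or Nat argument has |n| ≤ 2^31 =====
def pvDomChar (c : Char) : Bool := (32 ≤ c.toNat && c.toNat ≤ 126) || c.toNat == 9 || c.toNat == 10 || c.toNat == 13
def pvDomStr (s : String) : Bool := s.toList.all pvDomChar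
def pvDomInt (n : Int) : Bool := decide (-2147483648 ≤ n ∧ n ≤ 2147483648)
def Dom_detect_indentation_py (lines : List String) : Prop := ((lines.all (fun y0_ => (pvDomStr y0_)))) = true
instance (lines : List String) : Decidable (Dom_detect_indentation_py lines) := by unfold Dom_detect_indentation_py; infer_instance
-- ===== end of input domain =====

-- B fuses A's two separate any(...) scans into a single early-exiting loop carrying two booleans (alternative decomposition, same cost).


-- ===== PORT A =====
def detect_indentation_py (lines : List String) : String :=
  let tabs_used := lines.any (fun line => PySem.Str.isIn "\t" line)
  let spaces_used := lines.any (fun line => PySem.Str.isIn " " line)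
  if tabs_used && spaces_used then "??"
  else if tabs_used then "tabs"
  else if spaces_used then "spaces"
  else "??"

-- ===== PORT B =====
def detectIndentLoop (lines : List String) (tabs_used spaces_used : Bool) : String :=
  match lines with
  | [] => if tabs_used then "tabs" else if spaces_used then "spaces" else "??"
  | line :: rest =>
    let tabs_used := tabs_used || PySem.Str.isIn "\t" line
    let spaces_used := spaces_used || PySem.Str.isIn " " line
    if tabs_used && spaces_used then "??"
    else detectIndentLoop rest tabs_used spaces_used

def detect_indentation_py_alt (lines : List String) : String :=
  detectIndentLoop lines false false

-- ===== PRECONDITION & SPEC =====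
def Spec_detect_indentation_py (lines : List String) (out : String) : Prop := out = detect_indentation_py_alt lines
instance (lines : List String) (out : String) : Decidable (Spec_detect_indentation_py lines out) := by unfold Spec_detect_indentation_py; infer_instance

-- ===== CLAIM (what is proved, stated in full; the proofs are below) =====
def Claim_equal_detect_indentation_py : Prop := ∀ (lines : List String), Dom_detect_indentation_py lines → Spec_detect_indentation_py lines (detect_indentation_py lines)

-- ===== LEMMAS AND PROOFS =====

/-- The loop of B computes A's formula with the accumulators or-ed in (invariant: not both set). -/
theorem detectIndentLoop_eq (lines : List String) (t s : Bool) (h : (t && s) = false) :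
    detectIndentLoop lines t s =
      (let T := t || lines.any (fun line => PySem.Str.isIn "\t" line)
       let S := s || lines.any (fun line => PySem.Str.isIn " " line)
       if T && S then "??" else if T then "tabs" else if S then "spaces" else "??") := by
  induction lines generalizing t s with
  | nil => cases t <;> cases s <;> simp_all [detectIndentLoop]
  | cons line rest ih =>
    cases t <;> cases s
    case true.true => simp at h
    all_goals
      cases ht : PySem.Chars.isIn ['\t'] line.toList <;> cases hs : PySem.Chars.isIn [' '] line.toList <;>
        simp [detectIndentLoop, ht, hs, ih]

-- ===== VERDICT (by name: the statement is the Claim_ definition above) =====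
theorem detect_indentation_py_spec : Claim_equal_detect_indentation_py := by
  intro lines _
  unfold Spec_detect_indentation_py detect_indentation_py detect_indentation_py_alt
  rw [detectIndentLoop_eq _ _ _ rfl]
  simp
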